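-- pv_equiv track=rewrite | github.com/araroot/themes | build_interactive_dashboard.py | match_pivot_to_rank
-- ===== SOURCE A (Python) =====
-- def match_pivot_to_rank(rank_date_tuple, available_pivots):
--     """
--     Match rank date to appropriate pivot file
--     - End of month (day >= 25): same month pivot
--     - Mid month (day < 25): previous month pivot
--     """
--     year, month, day = rank_date_tuple
--
--     # Determine target pivot month
--     if day >= 25:
--         # End of month -> use same month pivot
--         target_year, target_month = year, month
--     else:
--         # Mid month -> use previous month pivot
--         target_month = month - 1
--         target_year = year
--         if target_month < 1:
--             target_month = 12
--             target_year -= 1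
--
--     # Find matching pivot
--     for pivot_file, (py, pm) in available_pivots:
--         if py == target_year and pm == target_month:
--             return pivot_file
--
--     # Fallback: return closest earlier pivot
--     sorted_pivots = sorted(available_pivots, key=lambda x: (x[1][0], x[1][1]), reverse=True)
--     for pivot_file, (py, pm) in sorted_pivots:
--         if (py, pm) <= (target_year, target_month):
--             return pivot_file
--
--     # Last resort: return latest pivot
--     if sorted_pivots:
--         return sorted_pivots[0][0]
--     return None
-- ===== SOURCE B (Python) =====
-- def match_pivot_to_rank(rank_date_tuple, available_pivots):
--     """One linear pass: track the best pivot <= target month and the best pivot overall."""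
--     year, month, day = rank_date_tuple
--     if day >= 25:
--         target = (year, month)
--     else:
--         tm = month - 1
--         target = (year - 1, 12) if tm < 1 else (year, tm)
--     best_leq = None
--     best_all = None
--     for pivot_file, (py, pm) in available_pivots:
--         if best_all is None or (py, pm) > best_all[1]:
--             best_all = (pivot_file, (py, pm))
--         if (py, pm) <= target and (best_leq is None or (py, pm) > best_leq[1]):
--             best_leq = (pivot_file, (py, pm))
--     if best_leq is not None:
--         return best_leq[0]
--     if best_all is not None:
--         return best_all[0]
--     return None
-- ===== Notes on version B (the rewrite author's own statement) =====
-- stated objective: alternative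
-- what changed: Replaced A's exact-match scan plus sorted()-descending fallback scan plus last-resort head by one linear pass maintaining two running candidates (best pivot with key <= target and best pivot overall, first occurrence winning ties via strict comparisons), removing the sort.
import Mathlib
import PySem

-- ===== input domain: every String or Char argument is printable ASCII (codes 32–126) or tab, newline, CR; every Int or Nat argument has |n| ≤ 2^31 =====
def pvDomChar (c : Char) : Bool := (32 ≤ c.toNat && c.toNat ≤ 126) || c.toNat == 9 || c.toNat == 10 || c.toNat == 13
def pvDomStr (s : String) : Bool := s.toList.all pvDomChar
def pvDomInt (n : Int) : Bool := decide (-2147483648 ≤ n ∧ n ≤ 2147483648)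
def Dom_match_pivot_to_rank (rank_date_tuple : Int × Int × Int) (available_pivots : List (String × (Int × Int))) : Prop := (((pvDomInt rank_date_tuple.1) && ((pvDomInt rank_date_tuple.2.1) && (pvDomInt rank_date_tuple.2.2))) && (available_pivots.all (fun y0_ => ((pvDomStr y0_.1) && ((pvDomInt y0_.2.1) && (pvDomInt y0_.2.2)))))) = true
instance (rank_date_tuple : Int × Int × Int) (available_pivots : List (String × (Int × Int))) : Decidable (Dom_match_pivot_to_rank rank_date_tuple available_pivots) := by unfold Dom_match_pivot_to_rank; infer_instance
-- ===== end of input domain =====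

-- B replaces A's exact-match scan + stable descending sort + two fallback scans by ONE linear pass
-- keeping two running candidates (best pivot ≤ target, best pivot overall), with no sort.

-- Python's lexicographic `<` on int pairs (shape matches PySem.List.sorted2's tuple comparison).
def pvKlt (a b : Int × Int) : Bool := decide (a.1 < b.1) || (!decide (b.1 < a.1) && decide (a.2 < b.2))

-- ===== PORT A =====
-- the for-loop with early return over available_pivots / over sorted_pivots = List.find?
def pvACore (target : Int × Int) (available_pivots : List (String × (Int × Int))) : Option String :=
  match available_pivots.find? (fun p => decide (p.2.1 = target.1) && decide (p.2.2 = target.2)) with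
  | some p => some p.1
  | none =>
    -- sorted(available_pivots, key=lambda x: (x[1][0], x[1][1]), reverse=True)
    let sorted_pivots := PySem.List.sorted2 available_pivots (fun x => x.2.1) (fun x => x.2.2) true
    match sorted_pivots.find? (fun p => !pvKlt target p.2) with   -- (py, pm) <= (ty, tm)
    | some p => some p.1
    | none =>
      match sorted_pivots with
      | [] => none
      | h :: _ => some h.1

def match_pivot_to_rank (rank_date_tuple : Int × Int × Int) (available_pivots : List (String × (Int × Int))) : Option String :=
  let year := rank_date_tuple.1
  let month := rank_date_tuple.2.1
  let day := rank_date_tuple.2.2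
  let target : Int × Int :=
    if day ≥ 25 then (year, month)
    else
      let tm := month - 1
      if tm < 1 then (year - 1, 12) else (year, tm)
  pvACore target available_pivots

-- ===== PORT B =====
-- one loop step of Source B: update best_all, then best_leq (strict comparison: first occurrence wins)
def pvStepB (target : Int × Int) (s : Option (String × (Int × Int)) × Option (String × (Int × Int)))
    (p : String × (Int × Int)) : Option (String × (Int × Int)) × Option (String × (Int × Int)) :=
  let ba := match s.2 with
    | none => some p
    | some b => if pvKlt b.2 p.2 then some p else some b
  let bl := match s.1 with
    | none => if !pvKlt target p.2 then some p else none
    | some b => if !pvKlt target p.2 && pvKlt b.2 p.2 then some p else some b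
  (bl, ba)

def pvBCore (target : Int × Int) (available_pivots : List (String × (Int × Int))) : Option String :=
  let st := available_pivots.foldl (pvStepB target) (none, none)
  match st.1 with
  | some b => some b.1
  | none =>
    match st.2 with
    | some b => some b.1
    | none => none

def match_pivot_to_rank_alt (rank_date_tuple : Int × Int × Int) (available_pivots : List (String × (Int × Int))) : Option String :=
  let year := rank_date_tuple.1
  let month := rank_date_tuple.2.1
  let day := rank_date_tuple.2.2
  let target : Int × Int :=
    if day ≥ 25 then (year, month)
    else
      let tm := month - 1
      if tm < 1 then (year - 1, 12) else (year, tm)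
  pvBCore target available_pivots

-- ===== PRECONDITION & SPEC =====
def Spec_match_pivot_to_rank (rank_date_tuple : Int × Int × Int) (available_pivots : List (String × (Int × Int))) (out : Option String) : Prop := out = match_pivot_to_rank_alt rank_date_tuple available_pivots
instance (rank_date_tuple : Int × Int × Int) (available_pivots : List (String × (Int × Int))) (out : Option String) : Decidable (Spec_match_pivot_to_rank rank_date_tuple available_pivots out) := by unfold Spec_match_pivot_to_rank; infer_instance

-- ===== CLAIM (what is proved, stated in full; the proofs are below) =====
def Claim_equal_match_pivot_to_rank : Prop := ∀ (rank_date_tuple : Int × Int × Int) (available_pivots : List (String × (Int × Int))), Dom_match_pivot_to_rank rank_date_tuple available_pivots → Spec_match_pivot_to_rank rank_date_tuple available_pivots (match_pivot_to_rank rank_date_tuple available_pivots)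

-- ===== LEMMAS AND PROOFS =====

theorem pvKlt_irrefl (a : Int × Int) : pvKlt a a = false := by
  obtain ⟨x, y⟩ := a; simp [pvKlt]

-- lex transitivity shape: key h < key x and key x ≤ t imply key h ≤ t
theorem pvKlt_step (h x t : Int × Int) (h1 : pvKlt h x = true) (h2 : pvKlt t x = false) :
    pvKlt t h = false := by
  obtain ⟨h1', h2'⟩ := h; obtain ⟨x1, x2⟩ := x; obtain ⟨t1, t2⟩ := t
  simp [pvKlt] at *; omega

-- lex totality: key h ≤ t and key h ≠ t imply key h < t
theorem pvKlt_total (h t : Int × Int) (h1 : pvKlt t h = false) (h2 : ¬ h = t) :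
    pvKlt h t = true := by
  obtain ⟨h1', h2'⟩ := h; obtain ⟨t1, t2⟩ := t
  simp [pvKlt, Prod.ext_iff] at *; omega

-- sorted2(..., reverse=True) is the left fold of stable insertion (by definition)
theorem pvSorted2_eq (l : List (String × (Int × Int))) :
    PySem.List.sorted2 l (fun x => x.2.1) (fun x => x.2.2) true
      = l.foldl (fun acc x => PySem.List.insertBy (fun a b => pvKlt b.2 a.2) x acc) [] := rfl

theorem pvFind?_insertBy_neg {α : Type} (bef : α → α → Bool) (q : α → Bool) (x : α) (l : List α)
    (hx : q x = false) :
    (PySem.List.insertBy bef x l).find? q = l.find? q := by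
  induction l with
  | nil => simp [PySem.List.insertBy, List.find?, hx]
  | cons h ys ih =>
    rw [PySem.List.insertBy]
    split
    · simp [List.find?, hx]
    · cases hqh : q h <;> simp [List.find?, hqh, ih]

theorem pvFind?_insertBy_pos (t : Int × Int) (x : String × (Int × Int))
    (l : List (String × (Int × Int))) (hx : pvKlt t x.2 = false) :
    (PySem.List.insertBy (fun a b => pvKlt b.2 a.2) x l).find? (fun p => !pvKlt t p.2)
      = match l.find? (fun p => !pvKlt t p.2) with
        | none => some x
        | some m => if pvKlt m.2 x.2 then some x else some m := by
  induction l with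
  | nil => simp [PySem.List.insertBy, List.find?, hx]
  | cons h ys ih =>
    rw [PySem.List.insertBy]
    by_cases hb : pvKlt h.2 x.2 = true
    · have hth : pvKlt t h.2 = false := pvKlt_step _ _ _ hb hx
      simp [hb, List.find?, hx, hth]
    · rw [if_neg (by simpa using hb)]
      cases hqh : pvKlt t h.2
      · simp [List.find?, hqh, Bool.not_eq_true] at hb ⊢
        simp [hb]
      · simp [List.find?, hqh, ih]

theorem pvHead?_insertBy {α : Type} (bef : α → α → Bool) (x : α) (l : List α) :
    (PySem.List.insertBy bef x l).head? = match l with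
      | [] => some x
      | h :: _ => if bef x h then some x else some h := by
  cases l with
  | nil => rfl
  | cons h ys =>
    rw [PySem.List.insertBy]
    by_cases hb : bef x h = true
    · simp [hb]
    · rw [Bool.not_eq_true] at hb; simp [hb]

-- the invariant: B's running pair is exactly (find? on the insertion-sorted list, its head)
theorem pvFoldInv (t : Int × Int) (l : List (String × (Int × Int)))
    (acc : List (String × (Int × Int))) (bl ba : Option (String × (Int × Int)))
    (hbl : bl = acc.find? (fun p => !pvKlt t p.2)) (hba : ba = acc.head?) :
    (l.foldl (pvStepB t) (bl, ba)).1
        = (l.foldl (fun a x => PySem.List.insertBy (fun a b => pvKlt b.2 a.2) x a) acc).find?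
            (fun p => !pvKlt t p.2)
      ∧ (l.foldl (pvStepB t) (bl, ba)).2
        = (l.foldl (fun a x => PySem.List.insertBy (fun a b => pvKlt b.2 a.2) x a) acc).head? := by
  induction l generalizing acc bl ba with
  | nil => exact ⟨hbl, hba⟩
  | cons x xs ih =>
    simp only [List.foldl_cons]
    have hstep : pvStepB t (bl, ba) x
        = ((PySem.List.insertBy (fun a b => pvKlt b.2 a.2) x acc).find? (fun p => !pvKlt t p.2),
           (PySem.List.insertBy (fun a b => pvKlt b.2 a.2) x acc).head?) := by
      subst hbl hba
      refine Prod.ext ?_ ?_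
      · by_cases hx : pvKlt t x.2 = true
        · rw [pvFind?_insertBy_neg _ _ _ _ (by simp [hx])]
          cases hc : acc.find? (fun p => !pvKlt t p.2) <;> simp [pvStepB, hx]
        · rw [Bool.not_eq_true] at hx
          rw [pvFind?_insertBy_pos t x acc hx]
          cases hc : acc.find? (fun p => !pvKlt t p.2) <;> simp [pvStepB, hx]
      · rw [pvHead?_insertBy]
        cases acc <;> simp [pvStepB]
    rw [hstep]
    exact ih _ _ _ rfl rfl

-- once best_leq holds a pivot whose key equals the target, it never changes
theorem pvFoldKeep (t : Int × Int) (l : List (String × (Int × Int)))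
    (b : String × (Int × Int)) (ba : Option (String × (Int × Int))) (hb : b.2 = t) :
    (l.foldl (pvStepB t) (some b, ba)).1 = some b := by
  induction l generalizing ba with
  | nil => rfl
  | cons x xs ih =>
    simp only [List.foldl_cons]
    have hstep : pvStepB t (some b, ba) x = (some b, (pvStepB t (some b, ba) x).2) := by
      refine Prod.ext ?_ rfl
      cases hx : pvKlt t x.2 <;> simp [pvStepB, hx, hb]
    rw [hstep]
    exact ih _

-- if an exact match exists, B's best_leq ends as the FIRST exact match
theorem pvFoldExact (t : Int × Int) (l : List (String × (Int × Int)))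
    (bl ba : Option (String × (Int × Int)))
    (hbl : bl = none ∨ ∃ b, bl = some b ∧ pvKlt b.2 t = true)
    (m : String × (Int × Int))
    (hm : l.find? (fun p => decide (p.2.1 = t.1) && decide (p.2.2 = t.2)) = some m) :
    (l.foldl (pvStepB t) (bl, ba)).1 = some m := by
  induction l generalizing bl ba with
  | nil => simp at hm
  | cons x xs ih =>
    simp only [List.foldl_cons]
    by_cases hx : x.2.1 = t.1 ∧ x.2.2 = t.2
    · have hx2 : x.2 = t := Prod.ext hx.1 hx.2
      have hm' : x = m := by
        have h := hm
        simp only [List.find?, hx.1, hx.2, decide_true, Bool.and_self] at h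
        exact Option.some.inj h
      have hstep : (pvStepB t (bl, ba) x).1 = some x := by
        rcases hbl with h | ⟨b, hbeq, hlt⟩
        · subst h; simp [pvStepB, hx2, pvKlt_irrefl]
        · subst hbeq; simp [pvStepB, hx2, pvKlt_irrefl, hlt]
      have hpair : pvStepB t (bl, ba) x = (some x, (pvStepB t (bl, ba) x).2) :=
        Prod.ext hstep rfl
      rw [hpair, hm']
      exact pvFoldKeep t xs m _ (hm' ▸ hx2)
    · have hm' : xs.find? (fun p => decide (p.2.1 = t.1) && decide (p.2.2 = t.2)) = some m := by
        have hqx : (decide (x.2.1 = t.1) && decide (x.2.2 = t.2)) = false := by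
          rcases not_and_or.mp hx with h | h <;> simp [h]
        simpa [List.find?, hqx] using hm
      rw [show pvStepB t (bl, ba) x = ((pvStepB t (bl, ba) x).1, (pvStepB t (bl, ba) x).2) from rfl]
      refine ih _ _ ?_ hm'
      have hne : ¬ x.2 = t := by
        intro h; exact hx ⟨by rw [h], by rw [h]⟩
      rcases hbl with h | ⟨b, hbeq, hlt⟩
      · subst h
        cases hxk : pvKlt t x.2
        · exact Or.inr ⟨x, by simp [pvStepB, hxk], pvKlt_total _ _ hxk hne⟩
        · exact Or.inl (by simp [pvStepB, hxk])
      · subst hbeq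
        cases hxk : pvKlt t x.2
        · cases hbx : pvKlt b.2 x.2
          · exact Or.inr ⟨b, by simp [pvStepB, hxk, hbx], hlt⟩
          · exact Or.inr ⟨x, by simp [pvStepB, hxk, hbx], pvKlt_total _ _ hxk hne⟩
        · exact Or.inr ⟨b, by simp [pvStepB, hxk], hlt⟩

theorem pvCore_eq (t : Int × Int) (aps : List (String × (Int × Int))) :
    pvACore t aps = pvBCore t aps := by
  unfold pvACore pvBCore
  have hinv := pvFoldInv t aps [] none none rfl rfl
  cases hfe : aps.find? (fun p => decide (p.2.1 = t.1) && decide (p.2.2 = t.2)) with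
  | some m =>
    have hbl : (aps.foldl (pvStepB t) (none, none)).1 = some m :=
      pvFoldExact t aps none none (Or.inl rfl) m hfe
    simp [hbl]
  | none =>
    simp only [pvSorted2_eq]
    obtain ⟨h1, h2⟩ := hinv
    rw [← h1, h2]
    cases hq : (aps.foldl (pvStepB t) (none, none)).1 with
    | some f => rfl
    | none =>
      generalize (List.foldl (fun acc x => PySem.List.insertBy (fun a b => pvKlt b.2 a.2) x acc) [] aps) = L
      cases L <;> simp

-- ===== VERDICT (by name: the statement is the Claim_ definition above) =====
theorem match_pivot_to_rank_spec : Claim_equal_match_pivot_to_rank := by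
  intro rank_date_tuple available_pivots _
  show _ = _
  unfold match_pivot_to_rank match_pivot_to_rank_alt
  exact pvCore_eq _ _
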